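/- GENERATED by farm/worked/mk_tree_copies.py from farm/worked/prep_huffman/Proof.lean (a worked proof of the farm's unit `prep_huffman`,
   accepted by the verdict) — do not edit. -/
/-
  `prep_huffman` (CONTRACTS 51; stb_vorbis_fixed.c:1662; FIX 21), 45 instructions, one do-while loop around `get8_packet_raw`.

      10d440 push r12 ; push rbp ; push rbx ; mov rbx, rdi
      10d447 check load4 [f+0x6e8] ; mov eax, valid_bits ; cmp eax, 0x18 ; ja EXIT          (ONE unsigned compare: idle arm)
      10d462 test eax, eax ; jne HEAD ; check store4 [f+0x6e4] ; acc = 0 ; jmp HEAD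
      10d47e CALL: mov rdi, rbx ; call get8_packet_raw ; 10d486 mov ebp, eax ; cmp eax, -1 ; je EXIT
      10d48d check load4 acc ; check load4 valid_bits ; shl ebp, cl ; acc += ; valid_bits += 8 ; cmp ecx, 0x18 ; jg EXIT
      10d4cc HEAD (= `Vorbis.L.prep_huffman.loop1`): check load4 last_seg ; je CALL ; check load1 bytes_in_seg ; jne CALL
      10d4f6 EXIT: pop rbx ; pop rbp ; pop r12 ; ret

  STRUCTURE OF THE PROOF. `hexit`: `Returned` from `PrepHuffmanPost` at any of the four `ret` paths (`Returned.mk`, no `v_returned`).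
  `hloop`: from any state satisfying `Head_w` (the loop invariant, a `def`: the head is reached from two places of the prelude and
  from the back edge) to `Returned`; measure `(25 − valid_bits).toNat`. Inside it `htail`: the rest of a round from the state
  `get8_packet_raw` returned (reached from BOTH arms of the head's test: stated once, used twice). After the call the walker's
  `w_rdi_10d481` / `w_rsp_10d481` give the callee-entry state's rdi and rsp (what its footprint and post are stated about).
-/
import Asan.CheckWalk
import Vorbis.Spec.ReaderLemmas
import Vorbis.Spec.Units.prep_huffman

open X86 X86.User Asan Vorbis

set_option maxRecDepth 4000
set_option maxHeartbeats 4000000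

namespace Vorbis.Spec.Worked.prep_huffman
open Vorbis.Spec.prep_huffman (Statement)
/-- **THE LOOP INVARIANT at `Vorbis.L.prep_huffman.loop1`** (0x10d4cc, `if (f->last_seg && !f->bytes_in_seg) return;`): `u` the
entry state, `v` the state at the head, `f = u.rdi`. -/
def Head_w (Blk : Block → Prop) (len : Nat) (u₀ u : State) (ret : Word) (f : Nat) (v : State) : Prop :=
  v.rip = Vorbis.L.prep_huffman.loop1 ∧
  v.reg .rbx = addr f ∧
  v.reg .rsp = u.reg .rsp - 24 ∧
  RegsKept [.rdi, .rbx, .rsp, .rax, .rcx, .rdx, .rbp, .r12, .rsi, .r8, .r9, .r10, .r11,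
    .r16, .r17, .r18, .r19, .r20, .r21, .r22, .r23, .r24, .r25, .r26, .r27, .r28, .r29, .r30, .r31] u v ∧
  Mem.SameExcept [⟨(u.reg .rsp).toNat - 288, (u.reg .rsp).toNat⟩,
    ⟨f + 48, f + 56⟩, ⟨f + 84, f + 96⟩, ⟨f + 136, f + 144⟩, ⟨f + 1484, f + 1749⟩, ⟨f + 1752, f + 1784⟩] u.mem v.mem ∧
  ShadowUntouched u.mem v.mem ∧
  UInt64.ofNat (v.mem.readLE (u.reg .rsp) 8) = ret ∧
  UInt64.ofNat (v.mem.readLE (u.reg .rsp - 8) 8) = u.reg .r12 ∧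
  UInt64.ofNat (v.mem.readLE (u.reg .rsp - 16) 8) = u.reg .rbp ∧
  UInt64.ofNat (v.mem.readLE (u.reg .rsp - 24) 8) = u.reg .rbx ∧
  v.flags.get .df = false ∧
  v.mxcsr &&& 8064 = 8064 ∧
  Mem.EqOn Vorbis.L.textLo Vorbis.L.textHi u₀.mem v.mem ∧
  Bits Blk len v.mem f ∧
  (0 ≤ stb_vorbis.valid_bits v.mem f ∧ stb_vorbis.valid_bits v.mem f ≤ 24) ∧
  (0 ≤ stb_vorbis.valid_bits u.mem f ∧ stb_vorbis.valid_bits u.mem f ≤ stb_vorbis.valid_bits v.mem f) ∧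
  mu v.mem f ≤ mu u.mem f

end Vorbis.Spec.Worked.prep_huffman

/-- `prep_huffman(f)` satisfies its contract: the refill loop `while (valid_bits ≤ 24)` around `get8_packet_raw` (measure
`(25 − valid_bits).toNat`, invariant `Head_w`), the early exits (`valid_bits > 24`, `last_seg && !bytes_in_seg`, end of packet) and
the two checked stores of `acc` / `valid_bits` per round; μ does not grow (a ≤-chain over the rounds). -/
theorem Vorbis.Spec.Worked.prep_huffman_ok : Vorbis.Spec.prep_huffman.Statement := by
  intro Lay hLay μ hμ u₀ hcode hload4 hstore4 h_raw hload1 others frames Blk len u ret he hpre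
  v_entry he
  have hsp := hpre.shadow.rsp
  have hwhere := hpre.where_obj
  obtain ⟨f, hf⟩ : ∃ f : Nat, (u.reg .rdi).toNat = f := ⟨_, rfl⟩
  have hr : u.reg .rdi = addr f := eq_addr _ _ hf
  have hbits : Bits Blk len u.mem f := hf ▸ hpre.bits
  have hL : BlkLive Blk (Live (stackObjs frames ++ others)) := hpre.env.live
  have hobr := hbits.OBR
  simp only [voff] at hobr
  have hV1 := hbits.V1
  rw [hf] at hwhere
  have hfa : (addr f).toNat = f := toNat_addr f (by omega)
  have ea4 : addr f + 1764 = addr (f + 1764) := by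
    simp only [vfield]
  have ea8 : addr f + 1768 = addr (f + 1768) := by
    simp only [vfield]
  have hraw := h_raw others frames Blk len
  -- THE FOUR EXITS (0x10d4f6 `pop rbx ; pop rbp ; pop r12 ; ret`): `Returned` from the postcondition
  have hexit : ∀ v : State, v.rip = ret → v.reg .rsp = u.reg .rsp + 8 → v.reg .rbx = u.reg .rbx →
      v.reg .rbp = u.reg .rbp → v.reg .r12 = u.reg .r12 →
      RegsKept [.rdi, .rbx, .rsp, .rax, .rcx, .rdx, .rbp, .r12, .rsi, .r8, .r9, .r10, .r11,
        .r16, .r17, .r18, .r19, .r20, .r21, .r22, .r23, .r24, .r25, .r26, .r27, .r28, .r29, .r30, .r31] u v →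
      Mem.SameExcept [⟨(u.reg .rsp).toNat - 288, (u.reg .rsp).toNat⟩,
        ⟨f + 48, f + 56⟩, ⟨f + 84, f + 96⟩, ⟨f + 136, f + 144⟩, ⟨f + 1484, f + 1749⟩, ⟨f + 1752, f + 1784⟩] u.mem v.mem →
      Mem.EqOn Vorbis.L.textLo Vorbis.L.textHi u₀.mem v.mem → v.flags.get .df = false → v.mxcsr &&& 8064 = 8064 →
      Vorbis.Spec.PrepHuffmanPost Blk len f u v →
      Returned (conv u₀) (Spec.prep_huffman.spec others frames Blk len) u ret v := by
    intro v w_rip w_rsp w_rbx w_rbp w_r12 w_kept hsame w_eq hdf hmx hpost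
    refine X86.User.Returned.mk w_rip w_rsp (by u_saved) ?_ (Vorbis.conv_code_in w_eq) (Vorbis.abiInv_of hdf hmx) ?_
    · simp only [X86.User.Spec.footprint, vspec, hf]
      exact hsame
    · show Vorbis.Spec.PrepHuffmanPost Blk len (u.reg .rdi).toNat u v
      rw [hf]
      exact hpost
  -- THE LOOP, from any state at its head that satisfies the invariant
  have hloop : ∀ s : State, Vorbis.Spec.Worked.prep_huffman.Head_w Blk len u₀ u ret f s →
      ReachVia Lay μ WayInv s (Returned (conv u₀) (Spec.prep_huffman.spec others frames Blk len) u ret) := by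
    intro s hhead
    obtain ⟨w_rip, w_rbx, w_rsp, w_kept, hsame, hun, hs0, hs1, hs2, hs3, hdf, hmx, w_eq, hb, hvb, hgrow, hmu⟩ := hhead
    u_loop (fun v => ((25 : Int) - stb_vorbis.valid_bits v.mem f).toNat)
    -- THE TAIL of a round, from the state `get8_packet_raw` returned (0x10d486), reached from both arms of the head's test
    have htail : ∀ sc sr : State, sc.mem = s.mem.writeLE (u.reg .rsp - 32) 8 1102982 → sr.rip = 1102982 →
        sr.reg .rsp = u.reg .rsp - 24 →
        RegsKept [.rdi, .rbx, .rsp, .rax, .rcx, .rdx, .rbp, .r12, .rsi, .r8, .r9, .r10, .r11,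
          .r16, .r17, .r18, .r19, .r20, .r21, .r22, .r23, .r24, .r25, .r26, .r27, .r28, .r29, .r30, .r31] u sr →
        sr.reg .rbx = addr f →
        Mem.SameExcept [⟨(u.reg .rsp - 32).toNat - 256, (u.reg .rsp - 32).toNat⟩,
          ⟨f + 48, f + 56⟩, ⟨f + 84, f + 96⟩, ⟨f + 136, f + 144⟩, ⟨f + 1484, f + 1749⟩, ⟨f + 1752, f + 1764⟩,
          ⟨f + 1772, f + 1784⟩] sc.mem sr.mem →
        (conv u₀).code.In sr.mem → (conv u₀).inv sr →
        Vorbis.Spec.PacketRawPost Blk len f sc sr →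
        ReachVia Lay μ WayInv sr (fun v' =>
          Returned (conv u₀) (Spec.prep_huffman.spec others frames Blk len) u ret v' ∨
            (Vorbis.Spec.Worked.prep_huffman.Head_w Blk len u₀ u ret f v' ∧
              ((25 : Int) - stb_vorbis.valid_bits v'.mem f).toNat < ((25 : Int) - stb_vorbis.valid_bits s.mem f).toNat)) := by
      intro s_10d481 s_10d481r w_mem_10d481 w_rip w_rsp w_kept w_rbx w_same w_code w_inv hpost
      have w_eq := Vorbis.conv_code_eqOn w_code
      -- the return address of the call is off `*f`
      have hEc : Mem.EqOn f (f + 1808) s.mem s_10d481.mem := by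
        rw [w_mem_10d481]
        exact Mem.eqOn_writeLE s.mem _ 8 _ f 1808 (by u_omega) (by u_omega)
      obtain ⟨hbc, emuc, evbc, eaccc⟩ := Vorbis.Spec.PrepHuffman.obj_same hb hEc
      rw [w_mem_10d481] at w_same
      have hq0 : UInt64.ofNat (s_10d481r.mem.readLE (u.reg .rsp) 8) = ret := by u_frame hs0
      have hq1 : UInt64.ofNat (s_10d481r.mem.readLE (u.reg .rsp - 8) 8) = u.reg .r12 := by u_frame hs1
      have hq2 : UInt64.ofNat (s_10d481r.mem.readLE (u.reg .rsp - 16) 8) = u.reg .rbp := by u_frame hs2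
      have hq3 : UInt64.ofNat (s_10d481r.mem.readLE (u.reg .rsp - 24) 8) = u.reg .rbx := by u_frame hs3
      have hunr : ShadowUntouched u.mem s_10d481r.mem := by v_untouched
      have hdfr : s_10d481r.flags .df = false := (show X86.User.abiInv _ from w_inv).1
      have hmxr : s_10d481r.mxcsr &&& 8064 = 8064 := (show X86.User.abiInv _ from w_inv).2
      have hpush : Mem.SameExcept _ u.mem (s.mem.writeLE (u.reg .rsp - 32) 8 1102982) :=
        Mem.SameExcept.step_writeLE' (u.reg .rsp - 32) 8 1102982 hsame (by u_omega) (by u_same_side)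
      have hsamer : Mem.SameExcept [⟨(u.reg .rsp).toNat - 288, (u.reg .rsp).toNat⟩,
          ⟨f + 48, f + 56⟩, ⟨f + 84, f + 96⟩, ⟨f + 136, f + 144⟩, ⟨f + 1484, f + 1749⟩, ⟨f + 1752, f + 1784⟩]
          u.mem s_10d481r.mem := by
        refine Vorbis.Spec.Reader.sameExcept_through_callee hpush w_same ?_
        simp only [List.forall_mem_cons, List.not_mem_nil, false_imp_iff, implies_true, and_true, X86.User.inSpans_cons,
          X86.User.inSpans_nil, or_false]
        repeat' apply And.intro
        all_goals u_omega
      -- the callee's post, from the head's state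
      have hbr : Bits Blk len s_10d481r.mem f := hpost.reader.bits
      have hmur : mu s_10d481r.mem f ≤ mu s.mem f := by
        rw [← emuc]
        exact hpost.reader.mu_le
      have hvr : stb_vorbis.valid_bits s_10d481r.mem f = stb_vorbis.valid_bits s.mem f := hpost.bitsSame.1.trans evbc
      obtain ⟨z, w_rax⟩ : ∃ z : Word, s_10d481r.reg .rax = z := ⟨_, rfl⟩
      have hres : z = Vorbis.Spec.EOP ∨ z.toNat < 256 := w_rax ▸ hpost.result
      obtain ⟨m, rv⟩ : ∃ m : Nat, s_10d481r.mem.readLE (addr f + 1768) 4 = m := ⟨_, rfl⟩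
      have hmv : stb_vorbis.valid_bits s_10d481r.mem f = (m : Int) ∧ m ≤ 24 := by
        have e : s_10d481r.mem.u32 (f + 1768) = m := by
          rw [← rv]
          simp only [vfield]
        have hc := s_10d481r.mem.i32_cases (f + 1768)
        simp only [vacc, voff] at hvr hvb ⊢
        omega
      clear hpush w_same hEc hpost
      u_walk hcode [hμ.vendor] until [Vorbis.L.prep_huffman.loop1] span [Vorbis.L.textLo, Vorbis.L.textHi] side (v_side)
      · -- 0x10d494, load4 [f + 0x6e4] (`f->acc`)
        have hun'' : ShadowUntouched u.mem s_10d494.mem := by v_untouched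
        exact Vorbis.Spec.check_site hpre.shadow.inv hun'' (hbits.site_field hL 1764 4 (by omega) (by omega) rfl) (by u_omega)
      · -- 0x10d4a7, load4 [f + 0x6e8] (`f->valid_bits`)
        have hun'' : ShadowUntouched u.mem s_10d4a7.mem := by v_untouched
        exact Vorbis.Spec.check_site hpre.shadow.inv hun'' (hbits.site_field hL 1768 4 (by omega) (by omega) rfl) (by u_omega)
      · -- `if (z == EOP) return;`: nothing of `acc`, `valid_bits` written
        refine ReachVia.done (Or.inl ?_)
        refine hexit _ w_rip w_rsp w_rbx w_rbp w_r12 w_kept ?_ w_eq ?_ ?_ ?_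
        · rw [w_mem]
          exact hsamer
        · rw [w_flags]
          simp only [X86.User.df_setStatus]
          exact hdfr
        · rw [w_mxcsr]
          exact hmxr
        · refine ⟨?_, ⟨?_, ?_⟩, ?_, ?_⟩
          · rw [w_mem]
            exact hunr
          · rw [w_mem]
            exact hbr
          · rw [w_mem]
            exact Nat.le_trans hmur hmu
          · intro hidle
            omega
          · intro _
            rw [w_mem]
            omega
      · -- `valid_bits + 8 > 24`: the loop ends
        have K : Bits Blk len s_10d4fa.mem f ∧ mu s_10d4fa.mem f = mu s_10d481r.mem f ∧
            stb_vorbis.valid_bits s_10d4fa.mem f = (m : Int) + 8 := by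
          rw [w_mem, ea4, ea8, ← Vorbis.Spec.PrepHuffman.vb_add8 m hmv.2]
          refine Vorbis.Spec.BitReader.three_stores hbr _ _ (by u_omega) (by u_omega) _ _ ?_
          rw [Vorbis.Spec.PrepHuffman.vb_add8 m hmv.2]
          omega
        refine ReachVia.done (Or.inl ?_)
        refine hexit _ w_rip w_rsp w_rbx w_rbp w_r12 w_kept ?_ w_eq ?_ ?_ ?_
        · u_same
        · rw [w_flags]
          simp only [X86.User.df_setStatus]
          exact w_df_10d4a7
        · rw [w_mxcsr]
          exact hmxr
        · refine ⟨by v_untouched, ⟨K.1, by omega⟩, ?_, ?_⟩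
          · intro hidle
            omega
          · intro _
            omega
      · -- the back edge: `valid_bits + 8 ≤ 24`
        have K : Bits Blk len s_10d4ca.mem f ∧ mu s_10d4ca.mem f = mu s_10d481r.mem f ∧
            stb_vorbis.valid_bits s_10d4ca.mem f = (m : Int) + 8 := by
          rw [w_mem, ea4, ea8, ← Vorbis.Spec.PrepHuffman.vb_add8 m hmv.2]
          refine Vorbis.Spec.BitReader.three_stores hbr _ _ (by u_omega) (by u_omega) _ _ ?_
          rw [Vorbis.Spec.PrepHuffman.vb_add8 m hmv.2]
          omega
        have hle : (m : Int) + 8 ≤ 24 := by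
          rw [Vorbis.Spec.PrepHuffman.vb_add8 m hmv.2] at hbr_10d4ca
          have e : (24#32).toInt = 24 := by decide
          rw [e] at hbr_10d4ca
          omega
        have j_same : Mem.SameExcept [⟨(u.reg .rsp).toNat - 288, (u.reg .rsp).toNat⟩,
            ⟨f + 48, f + 56⟩, ⟨f + 84, f + 96⟩, ⟨f + 136, f + 144⟩, ⟨f + 1484, f + 1749⟩, ⟨f + 1752, f + 1784⟩]
            u.mem s_10d4ca.mem := by
          u_same
        have j_un : ShadowUntouched u.mem s_10d4ca.mem := by v_untouched
        have j0 : UInt64.ofNat (s_10d4ca.mem.readLE (u.reg .rsp) 8) = ret := by u_frame hq0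
        have j1 : UInt64.ofNat (s_10d4ca.mem.readLE (u.reg .rsp - 8) 8) = u.reg .r12 := by u_frame hq1
        have j2 : UInt64.ofNat (s_10d4ca.mem.readLE (u.reg .rsp - 16) 8) = u.reg .rbp := by u_frame hq2
        have j3 : UInt64.ofNat (s_10d4ca.mem.readLE (u.reg .rsp - 24) 8) = u.reg .rbx := by u_frame hq3
        have j_df : s_10d4ca.flags.get .df = false := by
          rw [w_flags]
          simp only [X86.User.df_setStatus]
          exact w_df_10d4a7
        have j_mx : s_10d4ca.mxcsr &&& 8064 = 8064 := by
          rw [w_mxcsr]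
          exact hmxr
        have j_v : 0 ≤ stb_vorbis.valid_bits s_10d4ca.mem f ∧ stb_vorbis.valid_bits s_10d4ca.mem f ≤ 24 := by omega
        have j_g : 0 ≤ stb_vorbis.valid_bits u.mem f ∧
            stb_vorbis.valid_bits u.mem f ≤ stb_vorbis.valid_bits s_10d4ca.mem f := by omega
        have j_mu : mu s_10d4ca.mem f ≤ mu u.mem f := by omega
        have j_ms : ((25 : Int) - stb_vorbis.valid_bits s_10d4ca.mem f).toNat <
            ((25 : Int) - stb_vorbis.valid_bits s.mem f).toNat := by omega
        exact ReachVia.done (Or.inr ⟨⟨w_rip, w_rbx, w_rsp, w_kept, j_same, j_un, j0, j1, j2, j3, j_df, j_mx, w_eq, K.1,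
          j_v, j_g, j_mu⟩, j_ms⟩)
    u_walk hcode [hμ.vendor] until [Vorbis.L.prep_huffman.loop1] span [Vorbis.L.textLo, Vorbis.L.textHi] side (v_side)
    case check_10d4d3 =>
      -- 0x10d4d3, load4 [f + 0x6dc] (`f->last_seg`)
      have hun' : ShadowUntouched u.mem s_10d4d3.mem := by v_untouched
      exact Vorbis.Spec.check_site hpre.shadow.inv hun' (hbits.site_field hL 1756 4 (by omega) (by omega) rfl) (by u_omega)
    case call_inv =>
      refine Vorbis.abiInv_of ?_ ?_
      · rw [w_flags]
        simp only [X86.User.df_setStatus]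
        exact w_df_10d4d3
      · rw [w_mxcsr]
        exact hmx
    case pre_10d481 =>
      have hun' : ShadowUntouched u.mem s_10d481.mem := by v_untouched
      have hEc : Mem.EqOn f (f + 1808) s.mem s_10d481.mem := by
        rw [w_mem]
        exact Mem.eqOn_writeLE s.mem _ 8 _ f 1808 (by u_omega) (by u_omega)
      refine hpre.again (hpre.shadow.call hun' (by u_omega) (by u_omega) (by u_omega)) (w_rdi.trans hr.symm) ?_
      rw [hf]
      exact (Vorbis.Spec.PrepHuffman.obj_same hb hEc).1
    case check_10d4e8 =>
      -- 0x10d4e8, load1 [f + 0x6d4] (`f->bytes_in_seg`)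
      have hun' : ShadowUntouched u.mem s_10d4e8.mem := by v_untouched
      exact Vorbis.Spec.check_site hpre.shadow.inv hun' (hbits.site_field hL 1748 1 (by omega) (by omega) rfl) (by u_omega)
    case call_inv =>
      refine Vorbis.abiInv_of ?_ ?_
      · rw [w_flags]
        simp only [X86.User.df_setStatus]
        exact w_df_10d4e8
      · rw [w_mxcsr]
        exact hmx
    case pre_10d481 =>
      have hun' : ShadowUntouched u.mem s_10d481.mem := by v_untouched
      have hEc : Mem.EqOn f (f + 1808) s.mem s_10d481.mem := by
        rw [w_mem]
        exact Mem.eqOn_writeLE s.mem _ 8 _ f 1808 (by u_omega) (by u_omega)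
      refine hpre.again (hpre.shadow.call hun' (by u_omega) (by u_omega) (by u_omega)) (w_rdi.trans hr.symm) ?_
      rw [hf]
      exact (Vorbis.Spec.PrepHuffman.obj_same hb hEc).1
    · have hp := w_post
      have c_rdi := w_rdi_10d481
      have c_rsp := w_rsp_10d481
      simp only [X86.User.Spec.footprint, vspec, c_rsp, c_rdi, hfa] at w_same
      have hp' : Vorbis.Spec.PacketRawPost Blk len f s_10d481 s_10d481r := by
        have h := hp
        change Vorbis.Spec.PacketRawPost Blk len (s_10d481.reg .rdi).toNat s_10d481 s_10d481r at h
        rw [c_rdi, hfa] at h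
        exact h
      exact htail _ _ w_mem_10d481 w_rip w_rsp w_kept w_rbx w_same w_code w_inv hp'
    · have hp := w_post
      have c_rdi := w_rdi_10d481
      have c_rsp := w_rsp_10d481
      simp only [X86.User.Spec.footprint, vspec, c_rsp, c_rdi, hfa] at w_same
      have hp' : Vorbis.Spec.PacketRawPost Blk len f s_10d481 s_10d481r := by
        have h := hp
        change Vorbis.Spec.PacketRawPost Blk len (s_10d481.reg .rdi).toNat s_10d481 s_10d481r at h
        rw [c_rdi, hfa] at h
        exact h
      exact htail _ _ w_mem_10d481 w_rip w_rsp w_kept w_rbx w_same w_code w_inv hp'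
    · -- `f->last_seg && !f->bytes_in_seg`: return; nothing of `*f` written in this round
      have hEx : Mem.EqOn f (f + 1808) s.mem s_10d4fa.mem := by
        rw [w_mem]
        exact Mem.eqOn_writeLE s.mem _ 8 _ f 1808 (by u_omega) (by u_omega)
      obtain ⟨hbx, emux, evbx, _⟩ := Vorbis.Spec.PrepHuffman.obj_same hb hEx
      refine ReachVia.done (Or.inl ?_)
      refine hexit _ w_rip w_rsp w_rbx w_rbp w_r12 w_kept ?_ w_eq ?_ ?_ ?_
      · u_same
      · rw [w_flags]
        simp only [X86.User.df_setStatus]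
        exact w_df_10d4e8
      · rw [w_mxcsr]
        exact hmx
      · refine ⟨by v_untouched, ⟨hbx, by omega⟩, ?_, ?_⟩
        · intro hidle
          omega
        · intro _
          omega
  -- THE PRELUDE: `if (f->valid_bits >= 0 && f->valid_bits <= 24)` as ONE unsigned compare; `if (f->valid_bits == 0) f->acc = 0;`
  obtain ⟨m0, rv0⟩ : ∃ m0 : Nat, u.mem.readLE (addr f + 1768) 4 = m0 := ⟨_, rfl⟩
  have hm0 := Vorbis.Spec.PrepHuffman.vb_cases u.mem f m0 rv0
  u_walk hcode [hμ.vendor] until [Vorbis.L.prep_huffman.loop1] span [Vorbis.L.textLo, Vorbis.L.textHi] side (v_side)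
  · -- 0x10d44e, load4 [f + 0x6e8] (`f->valid_bits`)
    have hun' : ShadowUntouched u.mem s_10d44e.mem := by v_untouched
    exact Vorbis.Spec.check_site hpre.shadow.inv hun' (hbits.site_field hL 1768 4 (by omega) (by omega) rfl) (by u_omega)
  · -- 0x10d46d, store4 [f + 0x6e4] (`f->acc`)
    have hun' : ShadowUntouched u.mem s_10d46d.mem := by v_untouched
    exact Vorbis.Spec.check_site hpre.shadow.inv hun' (hbits.site_field hL 1764 4 (by omega) (by omega) rfl) (by u_omega)
  · -- `ja`: `valid_bits < 0` or `24 < valid_bits`: nothing of `*f` is written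
    have hE : Mem.EqOn f (f + 1808) u.mem s_10d4fa.mem := by
      u_memnorm
      u_eqon
    obtain ⟨hbx, emux, evbx, eaccx⟩ := Vorbis.Spec.PrepHuffman.obj_same hbits hE
    refine ReachVia.done ?_
    refine hexit _ w_rip w_rsp w_rbx w_rbp w_r12 (w_kept.mono_all (by rfl)) ?_ w_eq ?_ ?_ ?_
    · u_same
    · rw [w_flags]
      simp only [X86.User.df_setStatus]
      exact w_df_10d44e
    · rw [w_mxcsr]
      exact he_mx
    · refine ⟨by v_untouched, ⟨hbx, Nat.le_of_eq emux⟩, ?_, ?_⟩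
      · intro _
        exact ⟨evbx, eaccx⟩
      · intro _
        exact Int.le_of_eq evbx.symm
  · -- `1 ≤ valid_bits ≤ 24`: into the loop
    have hE : Mem.EqOn f (f + 1808) u.mem s_10d464.mem := by
      u_memnorm
      u_eqon
    obtain ⟨hbx, emux, evbx, eaccx⟩ := Vorbis.Spec.PrepHuffman.obj_same hbits hE
    have j_same : Mem.SameExcept [⟨(u.reg .rsp).toNat - 288, (u.reg .rsp).toNat⟩,
        ⟨f + 48, f + 56⟩, ⟨f + 84, f + 96⟩, ⟨f + 136, f + 144⟩, ⟨f + 1484, f + 1749⟩, ⟨f + 1752, f + 1784⟩]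
        u.mem s_10d464.mem := by
      u_same
    have j_un : ShadowUntouched u.mem s_10d464.mem := by v_untouched
    have j0 : UInt64.ofNat (s_10d464.mem.readLE (u.reg .rsp) 8) = ret := by u_resolve
    have j1 : UInt64.ofNat (s_10d464.mem.readLE (u.reg .rsp - 8) 8) = u.reg .r12 := by u_resolve
    have j2 : UInt64.ofNat (s_10d464.mem.readLE (u.reg .rsp - 16) 8) = u.reg .rbp := by u_resolve
    have j3 : UInt64.ofNat (s_10d464.mem.readLE (u.reg .rsp - 24) 8) = u.reg .rbx := by u_resolve
    have j_df : s_10d464.flags.get .df = false := by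
      rw [w_flags]
      simp only [X86.User.df_setStatus]
      exact w_df_10d44e
    have j_mx : s_10d464.mxcsr &&& 8064 = 8064 := by
      rw [w_mxcsr]
      exact he_mx
    have j_v : 0 ≤ stb_vorbis.valid_bits s_10d464.mem f ∧ stb_vorbis.valid_bits s_10d464.mem f ≤ 24 := by omega
    have j_g : 0 ≤ stb_vorbis.valid_bits u.mem f ∧
        stb_vorbis.valid_bits u.mem f ≤ stb_vorbis.valid_bits s_10d464.mem f := by omega
    exact hloop _ ⟨w_rip, w_rbx, w_rsp, w_kept.mono_all (by rfl), j_same, j_un, j0, j1, j2, j3, j_df, j_mx, w_eq, hbx,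
      j_v, j_g, Nat.le_of_eq emux⟩
  · -- `valid_bits = 0`: `f->acc = 0`, then into the loop
    have K : Bits Blk len s_10d47c.mem f ∧ mu s_10d47c.mem f = mu u.mem f ∧
        stb_vorbis.valid_bits s_10d47c.mem f = stb_vorbis.valid_bits u.mem f := by
      rw [w_mem, ea4]
      refine Vorbis.Spec.PrepHuffman.acc_store_over hbits ?_ 0
      u_memnorm
      u_eqon
    have j_same : Mem.SameExcept [⟨(u.reg .rsp).toNat - 288, (u.reg .rsp).toNat⟩,
        ⟨f + 48, f + 56⟩, ⟨f + 84, f + 96⟩, ⟨f + 136, f + 144⟩, ⟨f + 1484, f + 1749⟩, ⟨f + 1752, f + 1784⟩]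
        u.mem s_10d47c.mem := by
      u_same
    have j_un : ShadowUntouched u.mem s_10d47c.mem := by v_untouched
    have j0 : UInt64.ofNat (s_10d47c.mem.readLE (u.reg .rsp) 8) = ret := by u_resolve
    have j1 : UInt64.ofNat (s_10d47c.mem.readLE (u.reg .rsp - 8) 8) = u.reg .r12 := by u_resolve
    have j2 : UInt64.ofNat (s_10d47c.mem.readLE (u.reg .rsp - 16) 8) = u.reg .rbp := by u_resolve
    have j3 : UInt64.ofNat (s_10d47c.mem.readLE (u.reg .rsp - 24) 8) = u.reg .rbx := by u_resolve
    have j_df : s_10d47c.flags.get .df = false := by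
      rw [w_flags]
      exact w_df_10d46d
    have j_mx : s_10d47c.mxcsr &&& 8064 = 8064 := by
      rw [w_mxcsr]
      exact he_mx
    have j_v : 0 ≤ stb_vorbis.valid_bits s_10d47c.mem f ∧ stb_vorbis.valid_bits s_10d47c.mem f ≤ 24 := by omega
    have j_g : 0 ≤ stb_vorbis.valid_bits u.mem f ∧
        stb_vorbis.valid_bits u.mem f ≤ stb_vorbis.valid_bits s_10d47c.mem f := by omega
    exact hloop _ ⟨w_rip, w_rbx, w_rsp, w_kept.mono_all (by rfl), j_same, j_un, j0, j1, j2, j3, j_df, j_mx, w_eq, K.1,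
      j_v, j_g, Nat.le_of_eq K.2.1⟩
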